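-- pv_equiv track=rewrite | github.com/ksilin/testdatapy | src/testdatapy/generators/master_data_generator.py | _get_dependency_order
-- ===== SOURCE A (Python) =====
-- from typing import Dict, Any, List, Optional
--
-- def _get_dependency_order(master_config: Dict[str, Any]) -> List[str]:
--     """Get dependency order for master data loading."""
--     vehicle_order = ["appointments", "customers", "products"]
--
--     # Ensure all configured entities are included
--     all_entities = list(master_config.keys())
--     ordered_entities = []
--
--     # Add priority entities first
--     for entity in vehicle_order:
--         if entity in all_entities:
--             ordered_entities.append(entity)
--             all_entities.remove(entity)
--
--     # Add remaining entities
--     ordered_entities.extend(all_entities)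
--
--     return ordered_entities
-- ===== SOURCE B (Python) =====
-- from typing import Dict, Any, List
--
-- def _get_dependency_order(master_config: Dict[str, Any]) -> List[str]:
--     """Get dependency order for master data loading."""
--     rank = {"appointments": 0, "customers": 1, "products": 2}
--     return sorted(master_config.keys(), key=lambda e: rank.get(e, len(rank)))
-- ===== Notes on version B (the rewrite author's own statement) =====
-- stated objective: idiomatic
-- what changed: Replaces the explicit partition loop (scan the priority list, append and remove from a copy of the keys) with a single stable sort of the keys under a priority-rank dict, relying on sort stability to keep non-priority keys in insertion order.
import Mathlib
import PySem

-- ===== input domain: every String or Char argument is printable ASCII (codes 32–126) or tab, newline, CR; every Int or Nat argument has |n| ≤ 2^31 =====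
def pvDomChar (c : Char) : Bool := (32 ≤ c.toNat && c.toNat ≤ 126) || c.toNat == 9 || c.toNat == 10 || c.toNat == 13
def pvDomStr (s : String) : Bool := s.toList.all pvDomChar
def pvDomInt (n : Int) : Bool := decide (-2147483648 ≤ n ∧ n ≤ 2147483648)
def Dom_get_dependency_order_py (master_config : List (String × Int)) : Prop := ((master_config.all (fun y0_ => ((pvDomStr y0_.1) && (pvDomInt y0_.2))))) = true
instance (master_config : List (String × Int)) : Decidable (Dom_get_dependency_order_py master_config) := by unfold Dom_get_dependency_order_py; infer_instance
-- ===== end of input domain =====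

-- B replaces A's partition-and-remove loop over the fixed priority list by one stable
-- sort of the keys under a priority-rank dict (idiomatic; same observable result).

-- ===== PORT A =====
-- Literal port of A: for each priority entity in order, if present append it and
-- remove it from the remaining keys ('list.remove' of a present element; the
-- membership guard makes remove? return 'some', so getD never takes its default).
def get_dependency_order_py (master_config : List (String × Int)) : List String :=
  let vehicle_order : List String := ["appointments", "customers", "products"]
  let all_entities : List String := (PySem.Dict.ofList master_config).keys
  let s :=
    vehicle_order.foldl
      (fun (s : List String × List String) entity =>
        if entity ∈ s.2 then
          (s.1 ++ [entity], (PySem.List.remove? s.2 entity).getD s.2)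
        else s)
      (([] : List String), all_entities)
  s.1 ++ s.2

-- ===== PORT B =====
-- Literal port of B: stable sort of the keys by rank.get(e, len(rank)).
def get_dependency_order_py_alt (master_config : List (String × Int)) : List String :=
  let rank : PySem.Dict String Int :=
    PySem.Dict.ofList [("appointments", 0), ("customers", 1), ("products", 2)]
  PySem.List.sorted (PySem.Dict.ofList master_config).keys
    (fun e => rank.getD e (rank.size : Int)) false

-- ===== PRECONDITION & SPEC =====
def Spec_get_dependency_order_py (master_config : List (String × Int)) (out : List String) : Prop := out = get_dependency_order_py_alt master_config
instance (master_config : List (String × Int)) (out : List String) : Decidable (Spec_get_dependency_order_py master_config out) := by unfold Spec_get_dependency_order_py; infer_instance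

-- ===== CLAIM (what is proved, stated in full; the proofs are below) =====
def Claim_equal_get_dependency_order_py : Prop := ∀ (master_config : List (String × Int)), Dom_get_dependency_order_py master_config → Spec_get_dependency_order_py master_config (get_dependency_order_py master_config)

-- ===== LEMMAS AND PROOFS =====

/-- The rank B sorts by, written out as a case split. -/
def pvKey (e : String) : Int :=
  if e = "appointments" then 0 else if e = "customers" then 1 else if e = "products" then 2 else 3

lemma key_eval (e : String) :
    (PySem.Dict.ofList [("appointments", (0:Int)), ("customers", 1), ("products", 2)]).getD e
      ((PySem.Dict.ofList [("appointments", (0:Int)), ("customers", 1), ("products", 2)]).size : Int)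
      = pvKey e := by
  show (PySem.Dict.mk [("appointments", (0:Int)), ("customers", 1), ("products", 2)]).getD e 3
      = pvKey e
  unfold pvKey
  by_cases h1 : e = "appointments"
  · subst h1; rfl
  · by_cases h2 : e = "customers"
    · subst h2; rfl
    · by_cases h3 : e = "products"
      · subst h3; rfl
      · rw [if_neg h1, if_neg h2, if_neg h3,
          PySem.Dict.getD, PySem.Dict.get?_mk_cons, PySem.Dict.get?_mk_cons,
          PySem.Dict.get?_mk_cons]
        simp only [beq_iff_eq]
        rw [if_neg (fun h => h1 h.symm), if_neg (fun h => h2 h.symm),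
          if_neg (fun h => h3 h.symm)]
        rfl

lemma pvKey_eq_zero_iff (e : String) : pvKey e = 0 ↔ e = "appointments" := by
  unfold pvKey; split_ifs <;> simp_all
lemma pvKey_eq_one_iff (e : String) : pvKey e = 1 ↔ e = "customers" := by
  unfold pvKey; split_ifs <;> simp_all
lemma pvKey_eq_two_iff (e : String) : pvKey e = 2 ↔ e = "products" := by
  unfold pvKey; split_ifs <;> simp_all
lemma pvKey_eq_three_iff (e : String) :
    pvKey e = 3 ↔ (e ≠ "appointments" ∧ e ≠ "customers" ∧ e ≠ "products") := by
  unfold pvKey; split_ifs <;> simp_all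

lemma pvKey_le_three (e : String) : pvKey e ≤ 3 := by
  unfold pvKey; split_ifs <;> norm_num

lemma insertBy_append_left {α : Type} (before : α → α → Bool) (x : α) (ys zs : List α)
    (h : ∀ y ∈ ys, before x y = false) :
    PySem.List.insertBy before x (ys ++ zs) = ys ++ PySem.List.insertBy before x zs := by
  induction ys with
  | nil => rfl
  | cons y ys ih =>
    have hy := h y (by simp)
    simp only [List.cons_append, PySem.List.insertBy, hy, Bool.false_eq_true, if_false]
    exact congrArg (y :: ·) (ih fun y hy => h y (by simp [hy]))

lemma insertBy_all_true {α : Type} (before : α → α → Bool) (x : α) (zs : List α)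
    (h : ∀ y ∈ zs, before x y = true) :
    PySem.List.insertBy before x zs = x :: zs := by
  cases zs with
  | nil => rfl
  | cons z zs => simp [PySem.List.insertBy, h z (by simp)]

/-- Stable sort by `pvKey` is the concatenation of the four rank groups, each in order. -/
lemma sorted_canon (ks : List String) :
    PySem.List.sorted ks pvKey false =
      ks.filter (fun e => pvKey e = 0) ++ ks.filter (fun e => pvKey e = 1) ++
      ks.filter (fun e => pvKey e = 2) ++ ks.filter (fun e => pvKey e = 3) := by
  induction ks using List.reverseRecOn with
  | nil => rfl
  | append_singleton ks x ih =>
    have step : PySem.List.sorted (ks ++ [x]) pvKey false =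
        PySem.List.insertBy (fun a b => decide (pvKey a < pvKey b)) x
          (PySem.List.sorted ks pvKey false) := by
      rw [PySem.List.sorted_eq_foldl_insertBy, PySem.List.sorted_eq_foldl_insertBy,
        List.foldl_append]
      rfl
    have hk : pvKey x = 0 ∨ pvKey x = 1 ∨ pvKey x = 2 ∨ pvKey x = 3 := by
      unfold pvKey; split_ifs <;> simp
    have h0 : ∀ y ∈ ks.filter (fun e => pvKey e = 0), pvKey y = 0 := by
      intro y hy; simpa using (List.of_mem_filter hy)
    have h1 : ∀ y ∈ ks.filter (fun e => pvKey e = 1), pvKey y = 1 := by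
      intro y hy; simpa using (List.of_mem_filter hy)
    have h2 : ∀ y ∈ ks.filter (fun e => pvKey e = 2), pvKey y = 2 := by
      intro y hy; simpa using (List.of_mem_filter hy)
    have h3 : ∀ y ∈ ks.filter (fun e => pvKey e = 3), pvKey y = 3 := by
      intro y hy; simpa using (List.of_mem_filter hy)
    rw [step, ih]
    rcases hk with hx | hx | hx | hx
    · rw [show (ks.filter (fun e => pvKey e = 0) ++ ks.filter (fun e => pvKey e = 1) ++
          ks.filter (fun e => pvKey e = 2) ++ ks.filter (fun e => pvKey e = 3)) =
          ks.filter (fun e => pvKey e = 0) ++ (ks.filter (fun e => pvKey e = 1) ++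
          ks.filter (fun e => pvKey e = 2) ++ ks.filter (fun e => pvKey e = 3)) by simp,
        insertBy_append_left _ _ _ _ (by intro y hy; simp [h0 y hy, hx]),
        insertBy_all_true _ _ _ (by
          intro y hy
          simp only [List.append_assoc, List.mem_append] at hy
          rcases hy with hy | hy | hy
          · simp [h1 y hy, hx]
          · simp [h2 y hy, hx]
          · simp [h3 y hy, hx])]
      simp [List.filter_append, hx]
    · rw [show (ks.filter (fun e => pvKey e = 0) ++ ks.filter (fun e => pvKey e = 1) ++
          ks.filter (fun e => pvKey e = 2) ++ ks.filter (fun e => pvKey e = 3)) =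
          (ks.filter (fun e => pvKey e = 0) ++ ks.filter (fun e => pvKey e = 1)) ++
          (ks.filter (fun e => pvKey e = 2) ++ ks.filter (fun e => pvKey e = 3)) by simp,
        insertBy_append_left _ _ _ _ (by
          intro y hy
          simp only [List.mem_append] at hy
          rcases hy with hy | hy
          · simp [h0 y hy, hx]
          · simp [h1 y hy, hx]),
        insertBy_all_true _ _ _ (by
          intro y hy
          simp only [List.mem_append] at hy
          rcases hy with hy | hy
          · simp [h2 y hy, hx]
          · simp [h3 y hy, hx])]
      simp [List.filter_append, hx]
    · rw [show (ks.filter (fun e => pvKey e = 0) ++ ks.filter (fun e => pvKey e = 1) ++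
          ks.filter (fun e => pvKey e = 2) ++ ks.filter (fun e => pvKey e = 3)) =
          (ks.filter (fun e => pvKey e = 0) ++ ks.filter (fun e => pvKey e = 1) ++
          ks.filter (fun e => pvKey e = 2)) ++ ks.filter (fun e => pvKey e = 3) by simp,
        insertBy_append_left _ _ _ _ (by
          intro y hy
          simp only [List.append_assoc, List.mem_append] at hy
          rcases hy with hy | hy | hy
          · simp [h0 y hy, hx]
          · simp [h1 y hy, hx]
          · simp [h2 y hy, hx]),
        insertBy_all_true _ _ _ (by intro y hy; simp [h3 y hy, hx])]
      simp [List.filter_append, hx]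
    · rw [PySem.List.insertBy_of_forall_not_before _ _ _ (by
          intro y _
          have := pvKey_le_three y
          simp only [hx, decide_eq_false_iff_not]
          omega)]
      simp [List.filter_append, hx]

lemma filter_eq_singleton (a : String) (l : List String) (h : l.Nodup) :
    l.filter (fun e => e == a) = if a ∈ l then [a] else [] := by
  induction l with
  | nil => simp
  | cons x l ih =>
    simp only [List.nodup_cons] at h
    by_cases hxa : x = a
    · subst hxa
      have : l.filter (fun e => e == x) = [] :=
        List.filter_eq_nil_iff.mpr (fun b hb => by
          simp only [beq_iff_eq]
          rintro rfl; exact h.1 hb)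
      simp [this]
    · have hax : ¬ a = x := fun hh => hxa hh.symm
      simp [hxa, ih h.2, hax]

/-- The remainder A keeps after removing the three priority entities is exactly
the rank-3 group. -/
lemma rest_eq (ks : List String) (h : ks.Nodup) :
    ((ks.erase "appointments").erase "customers").erase "products" =
      ks.filter (fun e => pvKey e = 3) := by
  have h1 : (ks.erase "appointments").Nodup := h.erase _
  have h2 : ((ks.erase "appointments").erase "customers").Nodup := h1.erase _
  rw [List.Nodup.erase_eq_filter h2, List.Nodup.erase_eq_filter h1,
    List.Nodup.erase_eq_filter h, List.filter_filter, List.filter_filter]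
  refine List.filter_congr ?_
  intro e _
  by_cases e1 : e = "appointments" <;> by_cases e2 : e = "customers" <;>
    by_cases e3 : e = "products" <;> simp [pvKey_eq_three_iff, e1, e2, e3]

/-- A's partition-and-remove loop produces the four rank groups in order. -/
lemma A_eq_groups (ks : List String) (h : ks.Nodup) :
    (let s :=
      (["appointments", "customers", "products"] : List String).foldl
        (fun (s : List String × List String) entity =>
          if entity ∈ s.2 then
            (s.1 ++ [entity], (PySem.List.remove? s.2 entity).getD s.2)
          else s)
        (([] : List String), ks);
     s.1 ++ s.2) =
      ks.filter (fun e => pvKey e = 0) ++ ks.filter (fun e => pvKey e = 1) ++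
      ks.filter (fun e => pvKey e = 2) ++ ks.filter (fun e => pvKey e = 3) := by
  have rm : ∀ (l : List String) (v : String), v ∈ l →
      (PySem.List.remove? l v).getD l = l.erase v := by
    intro l v hv; rw [PySem.List.remove?_eq_some_erase l v hv]; rfl
  have st1 :
      (if "appointments" ∈ ks then
        (([] : List String) ++ ["appointments"],
          (PySem.List.remove? ks "appointments").getD ks)
      else (([] : List String), ks)) =
      ((if "appointments" ∈ ks then ["appointments"] else []), ks.erase "appointments") := by
    by_cases ha : "appointments" ∈ ks
    · simp [ha, rm ks _ ha]
    · simp [ha, List.erase_of_not_mem ha]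
  have mem_c : "customers" ∈ ks.erase "appointments" ↔ "customers" ∈ ks :=
    List.mem_erase_of_ne (by decide)
  have mem_p : "products" ∈ (ks.erase "appointments").erase "customers" ↔ "products" ∈ ks := by
    rw [List.mem_erase_of_ne (by decide), List.mem_erase_of_ne (by decide)]
  simp only [List.foldl, st1]
  -- second and third iterations
  have f0 : ks.filter (fun e => pvKey e = 0) = if "appointments" ∈ ks then ["appointments"] else [] := by
    rw [show ks.filter (fun e => decide (pvKey e = 0)) = ks.filter (fun e => e == "appointments") from
      List.filter_congr (fun e _ => by by_cases he : e = "appointments" <;> simp [pvKey_eq_zero_iff, he])]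
    exact filter_eq_singleton _ ks h
  have f1 : ks.filter (fun e => pvKey e = 1) = if "customers" ∈ ks then ["customers"] else [] := by
    rw [show ks.filter (fun e => decide (pvKey e = 1)) = ks.filter (fun e => e == "customers") from
      List.filter_congr (fun e _ => by by_cases he : e = "customers" <;> simp [pvKey_eq_one_iff, he])]
    exact filter_eq_singleton _ ks h
  have f2 : ks.filter (fun e => pvKey e = 2) = if "products" ∈ ks then ["products"] else [] := by
    rw [show ks.filter (fun e => decide (pvKey e = 2)) = ks.filter (fun e => e == "products") from
      List.filter_congr (fun e _ => by by_cases he : e = "products" <;> simp [pvKey_eq_two_iff, he])]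
    exact filter_eq_singleton _ ks h
  rw [f0, f1, f2, ← rest_eq ks h]
  by_cases hc : "customers" ∈ ks
  · by_cases hp : "products" ∈ ks
    · simp [mem_c.mpr hc, rm _ _ (mem_c.mpr hc), mem_p.mpr hp, rm _ _ (mem_p.mpr hp), hc, hp]
    · simp [mem_c.mpr hc, rm _ _ (mem_c.mpr hc), mem_p, hp, hc,
        List.erase_of_not_mem (fun hh => hp (mem_p.mp hh))]
  · have hc' : "customers" ∉ ks.erase "appointments" := fun hh => hc (mem_c.mp hh)
    rw [if_neg hc']
    by_cases hp : "products" ∈ ks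
    · have hp' : "products" ∈ ks.erase "appointments" :=
        (List.mem_erase_of_ne (show ("products":String) ≠ "appointments" by decide)).mpr hp
      simp [hc, hp, List.erase_of_not_mem hc', rm _ _ hp']
    · have hp' : "products" ∉ ks.erase "appointments" := fun hh =>
        hp ((List.mem_erase_of_ne (show ("products":String) ≠ "appointments" by decide)).mp hh)
      simp [hc, hp, List.erase_of_not_mem hc', List.erase_of_not_mem hp']

-- ===== VERDICT (by name: the statement is the Claim_ definition above) =====
theorem get_dependency_order_py_spec : Claim_equal_get_dependency_order_py := by
  intro mc _
  show get_dependency_order_py mc = get_dependency_order_py_alt mc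
  have hB : get_dependency_order_py_alt mc =
      PySem.List.sorted (PySem.Dict.ofList mc).keys pvKey false :=
    congrArg (PySem.List.sorted (PySem.Dict.ofList mc).keys · false) (funext key_eval)
  rw [hB, sorted_canon]
  exact A_eq_groups _ (PySem.Dict.nodup_keys_ofList mc)
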